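-- pv_equiv track=rewrite | github.com/Garkive/MSc_Thesis_Algorithm | DVRP_Version/DDestroyOps.py | remove_empty_routes
-- ===== SOURCE A (Python) =====
-- def find_id(pos, points):
--     i_d = points['id'][pos]
--     return i_d
--
-- def remove_empty_routes(partial_solution, points, veh_solution):
--     aux_list = []
--     for i in range(len(partial_solution)):
--         empty = [find_id(i,points), find_id(i,points)]
--         for j in range(len(partial_solution[i])):
--             if partial_solution[i][j] == empty:
--                 aux_list.append((i,j))
--     for k in reversed(range(len(aux_list))):
--         del partial_solution[aux_list[k][0]][aux_list[k][1]]
--         del veh_solution[aux_list[k][0]][aux_list[k][1]]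
--     return partial_solution, veh_solution
-- ===== SOURCE B (Python) =====
-- def remove_empty_routes(partial_solution, points, veh_solution):
--     for i, route in enumerate(partial_solution):
--         empty = [points['id'][i]] * 2
--         removed = [j for j, stop in enumerate(route) if stop == empty]
--         if removed:
--             route[:] = [stop for j, stop in enumerate(route) if j not in removed]
--             veh = veh_solution[i]
--             veh[:] = [x for j, x in enumerate(veh) if j not in removed]
--     return partial_solution, veh_solution
-- ===== Notes on version B (the rewrite author's own statement) =====
-- stated objective: simpler
-- what changed: Replaces A's two-phase 'collect all (i,j) pairs globally, then delete them one by one in reverse order' with a single per-route pass that computes the removed index set once and rebuilds each route (and its vehicle route) by one filter, written back in place.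
import Mathlib
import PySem

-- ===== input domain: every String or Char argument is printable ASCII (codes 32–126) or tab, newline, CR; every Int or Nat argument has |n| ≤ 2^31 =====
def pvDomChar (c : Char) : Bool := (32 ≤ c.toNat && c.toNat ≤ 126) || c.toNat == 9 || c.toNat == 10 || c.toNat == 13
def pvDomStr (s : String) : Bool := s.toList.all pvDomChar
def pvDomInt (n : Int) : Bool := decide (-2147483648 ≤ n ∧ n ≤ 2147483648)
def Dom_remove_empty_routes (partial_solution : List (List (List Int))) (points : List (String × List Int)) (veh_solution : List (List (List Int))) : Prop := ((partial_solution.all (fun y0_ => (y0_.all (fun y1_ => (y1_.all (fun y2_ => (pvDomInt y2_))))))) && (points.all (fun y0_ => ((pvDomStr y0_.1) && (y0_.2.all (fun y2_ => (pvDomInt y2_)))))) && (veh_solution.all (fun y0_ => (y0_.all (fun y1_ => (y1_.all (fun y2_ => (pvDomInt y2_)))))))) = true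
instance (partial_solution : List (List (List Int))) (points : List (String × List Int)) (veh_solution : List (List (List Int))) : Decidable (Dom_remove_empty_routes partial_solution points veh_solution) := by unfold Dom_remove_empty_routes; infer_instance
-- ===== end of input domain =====

-- B replaces A's global collect-pairs-then-delete-in-reverse structure by one per-route pass that
-- filters out the empty-marker stops (and the matching vehicle entries) and writes each route back;
-- both A and B mutate their list arguments in place in Python — the equivalence proved here is about the return value.


-- ===== PORT A =====
-- points['id'][pos]: the KeyError (no 'id') and IndexError (pos out of range) cases are excluded by
-- Pre_remove_empty_routes, so the getD defaults below never fire on admitted inputs.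
def pvFindId (pos : Int) (points : List (String × List Int)) : Int :=
  PySem.List.pyGetD ((points.lookup "id").getD []) pos 0

-- 'del l[b]' = l.pop(b) with the value discarded; pop? = none is Python's IndexError, excluded by Pre_.
def pvDelAt (l : List (List Int)) (b : Int) : List (List Int) :=
  ((PySem.List.pop? l b).map (·.2)).getD l

def remove_empty_routes (partial_solution : List (List (List Int))) (points : List (String × List Int)) (veh_solution : List (List (List Int))) : List (List (List Int)) × List (List (List Int)) :=
  let aux : List (Int × Int) :=
    (PySem.List.pyRange 0 partial_solution.length 1).foldl (fun acc i =>
      let empty := [pvFindId i points, pvFindId i points]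
      (PySem.List.pyRange 0 (PySem.List.pyGetD partial_solution i []).length 1).foldl (fun acc2 j =>
        if PySem.List.pyGetD (PySem.List.pyGetD partial_solution i []) j [] == empty then
          acc2 ++ [(i, j)] else acc2) acc) []
  -- indices aux[k].1 produced by range() are nonnegative, so .toNat is exact; an out-of-range
  -- outer index (Python IndexError) is excluded by Pre_, where modify's no-op never fires.
  ((PySem.List.pyRange 0 aux.length 1).reverse).foldl
    (fun (s : List (List (List Int)) × List (List (List Int))) k =>
      let ij := PySem.List.pyGetD aux k (0, 0)
      (s.1.modify ij.1.toNat (fun r => pvDelAt r ij.2),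
       s.2.modify ij.1.toNat (fun r => pvDelAt r ij.2)))
    (partial_solution, veh_solution)

-- ===== PORT B =====
def remove_empty_routes_alt (partial_solution : List (List (List Int))) (points : List (String × List Int)) (veh_solution : List (List (List Int))) : List (List (List Int)) × List (List (List Int)) :=
  (PySem.List.pyRange 0 partial_solution.length 1).foldl
    (fun (s : List (List (List Int)) × List (List (List Int))) i =>
      let route := PySem.List.pyGetD s.1 i []
      let idv := PySem.List.pyGetD ((points.lookup "id").getD []) i 0
      let empty := [idv, idv]
      let removed := ((PySem.List.enumerate route 0).filter (fun jx => jx.2 == empty)).map (·.1)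
      if removed.isEmpty then s
      else
        -- route[:] = … and veh[:] = … : write the filtered route back at index i (i from range() is
        -- nonnegative and < length, so .toNat/set are exact there; veh index error excluded by Pre_)
        (s.1.set i.toNat (((PySem.List.enumerate route 0).filter (fun jx => !removed.contains jx.1)).map (·.2)),
         s.2.set i.toNat (((PySem.List.enumerate (PySem.List.pyGetD s.2 i []) 0).filter (fun jx => !removed.contains jx.1)).map (·.2))))
    (partial_solution, veh_solution)

-- ===== PRECONDITION & SPEC =====
-- pvR ps pts i: the positions in route i that equal the empty-route marker [id_i, id_i] (input shape description used by Pre_).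
def pvR (ps : List (List (List Int))) (pts : List (String × List Int)) (i : Nat) : List Nat :=
  let route := ps.getD i []
  let idv := ((pts.lookup "id").getD []).getD i 0
  (List.range route.length).filter (fun j => route.getD j [] == [idv, idv])

-- Pre_ holds exactly where the Python A returns: the 'id' entry exists and is long enough (else
-- find_id raises), and for every route with removed positions the vehicle route exists and is long
-- enough that each 'del veh_solution[i][j]' (largest j first) is in range (else IndexError).
def Pre_remove_empty_routes (partial_solution : List (List (List Int))) (points : List (String × List Int)) (veh_solution : List (List (List Int))) : Prop :=
  ∀ i < partial_solution.length,
    ((points.lookup "id").isSome ∧ i < ((points.lookup "id").getD []).length) ∧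
    (pvR partial_solution points i ≠ [] →
      i < veh_solution.length ∧
      ∀ k < (pvR partial_solution points i).length,
        (pvR partial_solution points i).getD k 0 + ((pvR partial_solution points i).length - 1 - k)
          < (veh_solution.getD i []).length)
instance (partial_solution : List (List (List Int))) (points : List (String × List Int)) (veh_solution : List (List (List Int))) : Decidable (Pre_remove_empty_routes partial_solution points veh_solution) := by unfold Pre_remove_empty_routes; infer_instance

def pvWitness_remove_empty_routes : List (List (List Int)) × (List (String × List Int)) × List (List (List Int)) :=
  ([[[1, 1], [1, 2]], [[2, 3]]], [("id", [1, 2])], [[[7, 7], [8, 8]], [[9, 9]]])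

def Spec_remove_empty_routes (partial_solution : List (List (List Int))) (points : List (String × List Int)) (veh_solution : List (List (List Int))) (out : List (List (List Int)) × List (List (List Int))) : Prop := out = remove_empty_routes_alt partial_solution points veh_solution
instance (partial_solution : List (List (List Int))) (points : List (String × List Int)) (veh_solution : List (List (List Int))) (out : List (List (List Int)) × List (List (List Int))) : Decidable (Spec_remove_empty_routes partial_solution points veh_solution out) := by unfold Spec_remove_empty_routes; infer_instance

-- ===== CLAIM (what is proved, stated in full; the proofs are below) =====
def Claim_equal_remove_empty_routes : Prop := ∀ (partial_solution : List (List (List Int))) (points : List (String × List Int)) (veh_solution : List (List (List Int))), Dom_remove_empty_routes partial_solution points veh_solution → Pre_remove_empty_routes partial_solution points veh_solution → Spec_remove_empty_routes partial_solution points veh_solution (remove_empty_routes partial_solution points veh_solution)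

-- ===== LEMMAS AND PROOFS =====

-- ---- generic list lemmas ----
theorem pvModifyModify {α : Type} (l : List α) (i : Nat) (f g : α → α) :
    (l.modify i f).modify i g = l.modify i (fun x => g (f x)) := by
  apply List.ext_getElem?
  intro j
  simp only [List.getElem?_modify]
  split <;> simp [Option.map_map, Function.comp_def]

theorem pvSetGetDSelf {α : Type} (l : List α) (i : Nat) (d : α) :
    l.set i (l.getD i d) = l := by
  by_cases h : i < l.length
  · rw [List.getD_eq_getElem l d h]; exact List.set_getElem_self h
  · exact List.set_eq_of_length_le (by omega)

theorem pvSetEqModify {α : Type} (l : List α) (i : Nat) (d : α) (f : α → α) :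
    l.set i (f (l.getD i d)) = l.modify i f := by
  by_cases h : i < l.length
  · rw [List.getD_eq_getElem l d h, List.modify_eq_set_get f h]
    simp [List.get_eq_getElem]
  · rw [List.set_eq_of_length_le (by omega), List.modify_eq_self (by omega)]

theorem pvModifyOfFix {α : Type} (l : List α) (i : Nat) (d : α) (f : α → α)
    (h : f (l.getD i d) = l.getD i d) : l.modify i f = l := by
  rw [← pvSetEqModify l i d f, h, pvSetGetDSelf]

theorem pvModifyId {α : Type} (l : List α) (i : Nat) : l.modify i (fun x => x) = l := by
  apply List.ext_getElem?
  intro j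
  simp only [List.getElem?_modify]
  split <;> simp

theorem pvContainsCast (R : List Nat) (k : Nat) :
    (List.contains (R.map (Nat.cast : Nat → Int)) ((k : Nat) : Int)) = decide (k ∈ R) := by
  by_cases h : k ∈ R <;> simp [h, List.mem_map]

-- fold over reversed indices with getD indexing IS a fold over the reversed list
theorem pvFoldlRevRangeGetD {σ β : Type} (g : σ → β → σ) (d : β) :
    ∀ (l : List β) (s0 : σ),
      ((List.range l.length).reverse).foldl (fun s k => g s (l.getD k d)) s0 = l.reverse.foldl g s0 := by
  intro l
  induction l using List.reverseRecOn with
  | nil => intro s0; simp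
  | append_singleton t b ih =>
    intro s0
    rw [List.length_append, List.length_singleton, List.range_succ, List.reverse_append]
    simp only [List.reverse_singleton, List.singleton_append, List.foldl_cons]
    rw [List.getD_eq_getElem _ d (by simp), List.getElem_append_right (by simp),
      List.reverse_append, List.reverse_singleton, List.singleton_append, List.foldl_cons]
    simp only [List.getElem_singleton]
    rw [← ih (g s0 b)]
    apply PySem.List.foldl_congr_mem
    intro acc x hx
    have hxlt : x < t.length := by simpa using List.mem_range.mp (List.mem_reverse.mp hx)
    rw [List.getD_eq_getElem _ d (by simpa using Nat.lt_succ_of_lt hxlt),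
      List.getD_eq_getElem _ d hxlt, List.getElem_append_left hxlt]

-- the paired fold of per-index modifications, characterised pointwise
theorem pvFoldModifyPair {α β : Type} (dα : α) (f : Nat → α → α) (g : Nat → α → β → β) :
    ∀ (S : List Nat), S.Nodup → ∀ (p : List α) (v : List β) (t : Nat),
      ((S.foldl (fun s i => (s.1.modify i (f i), s.2.modify i (g i (s.1.getD i dα)))) (p, v)).1[t]? =
        if t ∈ S then p[t]?.map (f t) else p[t]?) ∧
      ((S.foldl (fun s i => (s.1.modify i (f i), s.2.modify i (g i (s.1.getD i dα)))) (p, v)).2[t]? =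
        if t ∈ S then v[t]?.map (g t (p.getD t dα)) else v[t]?) := by
  intro S
  induction S with
  | nil => intro _ p v t; simp
  | cons i S' ih =>
    intro hnd p v t
    have hnd' := (List.nodup_cons.mp hnd).2
    have hni : i ∉ S' := (List.nodup_cons.mp hnd).1
    simp only [List.foldl_cons]
    obtain ⟨ih1, ih2⟩ := ih hnd' (p.modify i (f i)) (v.modify i (g i (p.getD i dα))) t
    by_cases hti : t = i
    · subst hti
      constructor
      · rw [ih1, if_neg hni, if_pos (List.mem_cons_self ..)]
        simp
      · rw [ih2, if_neg hni, if_pos (List.mem_cons_self ..)]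
        simp
    · have hit : ¬ (i = t) := fun h => hti h.symm
      have hp : (p.modify i (f i))[t]? = p[t]? := by
        simp [hit]
      have hv : (v.modify i (g i (p.getD i dα)))[t]? = v[t]? := by
        simp [hit]
      have hpd : (p.modify i (f i)).getD t dα = p.getD t dα := by
        rw [List.getD_eq_getElem?_getD, List.getD_eq_getElem?_getD, hp]
      constructor
      · rw [ih1, hp]; simp only [List.mem_cons, hti, false_or]
      · rw [ih2, hv, hpd]; simp only [List.mem_cons, hti, false_or]

-- ---- positions of the marker, structurally ----
def pvRpos (e : List Int) : List (List Int) → List Nat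
  | [] => []
  | a :: t => if a == e then 0 :: (pvRpos e t).map (· + 1) else (pvRpos e t).map (· + 1)

theorem pvRangeFilterEqRpos (e : List Int) (w : List (List Int)) :
    (List.range w.length).filter (fun j => w.getD j [] == e) = pvRpos e w := by
  induction w with
  | nil => rfl
  | cons a t ih =>
    rw [List.length_cons, List.range_succ_eq_map, List.filter_cons, List.filter_map]
    have : ((fun j => (a :: t).getD j [] == e) ∘ Nat.succ) = (fun j => t.getD j [] == e) := by
      funext j; rfl
    have hsucc : (Nat.succ : Nat → Nat) = (· + 1) := rfl
    rw [this, ih, pvRpos, hsucc]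
    rfl

def pvKeepFrom {α : Type} (R : List Nat) : Nat → List α → List α
  | _, [] => []
  | k, a :: t => if k ∈ R then pvKeepFrom R (k + 1) t else a :: pvKeepFrom R (k + 1) t

def pvEraseOp {α : Type} (r : List α) (j : Nat) : List α :=
  if j < r.length then r.eraseIdx j else r

theorem pvKeepFromAppend {α : Type} (R : List Nat) (k : Nat) (xs ys : List α) :
    pvKeepFrom R k (xs ++ ys) = pvKeepFrom R k xs ++ pvKeepFrom R (k + xs.length) ys := by
  induction xs generalizing k with
  | nil => simp [pvKeepFrom]
  | cons a t ih =>
    simp only [List.cons_append, pvKeepFrom, ih (k + 1), List.length_cons]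
    have : k + 1 + t.length = k + (t.length + 1) := by omega
    rw [this]
    split <;> rfl

theorem pvKeepFromOfLt {α : Type} (R : List Nat) (k : Nat) (l : List α)
    (h : ∀ j ∈ R, j < k) : pvKeepFrom R k l = l := by
  induction l generalizing k with
  | nil => rfl
  | cons a t ih =>
    rw [pvKeepFrom, if_neg (fun hm => by have := h k hm; omega)]
    rw [ih (k + 1) (fun j hj => by have := h j hj; omega)]

theorem pvKeepFromCongr {α : Type} (R R' : List Nat) (k : Nat) (l : List α)
    (h : ∀ j, k ≤ j → j < k + l.length → (j ∈ R ↔ j ∈ R')) :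
    pvKeepFrom R k l = pvKeepFrom R' k l := by
  induction l generalizing k with
  | nil => rfl
  | cons a t ih =>
    rw [pvKeepFrom, pvKeepFrom]
    have hk := h k (le_refl k) (by simp)
    have ht := ih (k + 1) (fun j hj1 hj2 => h j (by omega) (by simp at hj2 ⊢; omega))
    by_cases hm : k ∈ R
    · rw [if_pos hm, if_pos (hk.mp hm), ht]
    · rw [if_neg hm, if_neg (fun hm' => hm (hk.mpr hm')), ht]

-- descending in-range deletions remove exactly the index set
theorem pvEraseFoldEqKeep {α : Type} :
    ∀ (R : List Nat), R.Pairwise (· < ·) → ∀ (l : List α),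
      (∀ k, k < R.length → R.getD k 0 + (R.length - 1 - k) < l.length) →
      R.reverse.foldl pvEraseOp l = pvKeepFrom R 0 l := by
  intro R
  induction R using List.reverseRecOn with
  | nil =>
    intro _ l _
    rw [List.reverse_nil, List.foldl_nil, pvKeepFromOfLt]
    intro j hj; cases hj
  | append_singleton R' b ih =>
    intro hsort l H
    have hsort' : R'.Pairwise (· < ·) := (List.pairwise_append.mp hsort).1
    have hRb : ∀ j ∈ R', j < b :=
      fun j hj => (List.pairwise_append.mp hsort).2.2 j hj b (List.mem_singleton.mpr rfl)
    have hblen : b < l.length := by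
      have := H R'.length (by simp)
      simpa using this
    rw [List.reverse_append, List.reverse_singleton, List.singleton_append, List.foldl_cons]
    have he : pvEraseOp l b = l.eraseIdx b := by rw [pvEraseOp, if_pos hblen]
    rw [he, ih hsort' (l.eraseIdx b) ?hlen]
    case hlen =>
      intro k hk
      have hk' : k < (R' ++ [b]).length := by simp; omega
      have := H k hk'
      rw [List.getD_append _ _ _ _ hk] at this
      rw [List.length_eraseIdx_of_lt hblen]
      simp only [List.length_append, List.length_singleton] at this
      omega
    -- now compare the two keeps on the decomposition of l at b
    have htlen : (l.take b).length = b := List.length_take_of_le (le_of_lt hblen)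
    have hdrop : ∀ j ∈ R' ++ [b], j < b + 1 := by
      intro j hj
      rcases List.mem_append.mp hj with hj' | hj'
      · have := hRb j hj'; omega
      · rw [List.mem_singleton.mp hj']; omega
    conv_rhs => rw [← List.take_append_drop b l, List.drop_eq_getElem_cons hblen]
    rw [List.eraseIdx_eq_take_drop_succ, pvKeepFromAppend, pvKeepFromAppend, htlen, Nat.zero_add,
      pvKeepFromOfLt R' b (l.drop (b + 1)) hRb,
      pvKeepFrom, if_pos (by simp), pvKeepFromOfLt (R' ++ [b]) (b + 1) (l.drop (b + 1)) hdrop,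
      pvKeepFromCongr (R' ++ [b]) R' 0 (l.take b)
        (fun j _ hj2 => by
          rw [Nat.zero_add, htlen] at hj2
          simp only [List.mem_append, List.mem_singleton]
          constructor
          · rintro (hx | hx)
            · exact hx
            · omega
          · exact fun hx => Or.inl hx)]

theorem pvPairwiseGetDAdd :
    ∀ (R : List Nat), R.Pairwise (· < ·) → ∀ (L : Nat), (∀ j ∈ R, j < L) →
      ∀ k, k < R.length → R.getD k 0 + (R.length - 1 - k) < L := by
  intro R
  induction R using List.reverseRecOn with
  | nil => intro _ L _ k hk; simp at hk
  | append_singleton R' b ih =>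
    intro h L hb k hk
    have hsort' : R'.Pairwise (· < ·) := (List.pairwise_append.mp h).1
    have hRb : ∀ j ∈ R', j < b :=
      fun j hj => (List.pairwise_append.mp h).2.2 j hj b (List.mem_singleton.mpr rfl)
    have hbL : b < L := hb b (by simp)
    simp only [List.length_append, List.length_singleton] at hk
    by_cases hkR : k < R'.length
    · have := ih hsort' b hRb k hkR
      have hg : (R' ++ [b]).getD k 0 = R'.getD k 0 := List.getD_append _ _ _ _ hkR
      rw [hg]
      simp only [List.length_append, List.length_singleton]
      omega
    · have hkb : k = R'.length := by omega
      subst hkb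
      have hg : (R' ++ [b]).getD R'.length 0 = b := by
        simp
      rw [hg]
      simp only [List.length_append, List.length_singleton]
      omega

-- ---- bridges between the ports' index expressions and the canonical forms ----
def pvMarker (pts : List (String × List Int)) (i : Nat) : List Int :=
  [((pts.lookup "id").getD []).getD i 0, ((pts.lookup "id").getD []).getD i 0]

theorem pvDelAtNatCast (r : List (List Int)) (j : Nat) :
    pvDelAt r ((j : Nat) : Int) = pvEraseOp r j := by
  by_cases h : j < r.length
  · simp [pvDelAt, PySem.List.pop?_natCast r j h, pvEraseOp, h]
  · have : PySem.List.pop? r (j : Int) = none := by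
      simp [PySem.List.pop?, PySem.List.pyIdx?]; omega
    simp [pvDelAt, this, pvEraseOp, h]

theorem pvRmEqRpos (e : List Int) :
    ∀ (w : List (List Int)) (k : Nat),
      ((PySem.List.enumerate w (k : Int)).filter (fun jx => jx.2 == e)).map (·.1) =
        (pvRpos e w).map (fun j => ((j + k : Nat) : Int)) := by
  intro w
  induction w with
  | nil => intro k; rfl
  | cons a t ih =>
    intro k
    rw [PySem.List.enumerate_cons, List.filter_cons]
    have hcast : (k : Int) + 1 = ((k + 1 : Nat) : Int) := by push_cast; ring
    by_cases ha : a == e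
    · rw [if_pos (by simpa using ha), List.map_cons, hcast, ih (k + 1), pvRpos, if_pos ha]
      rw [List.map_cons, List.map_map]
      refine congrArg₂ _ (by push_cast; ring) (List.map_congr_left ?_)
      intro j _
      simp only [Function.comp_apply]
      push_cast; ring_nf
    · rw [if_neg (by simpa using ha), hcast, ih (k + 1), pvRpos, if_neg ha]
      rw [List.map_map]
      refine List.map_congr_left ?_
      intro j _
      simp only [Function.comp_apply]
      push_cast; ring_nf

theorem pvKeepIEqKeepFrom {R : List Nat} :
    ∀ (w : List (List Int)) (k : Nat),
      ((PySem.List.enumerate w (k : Int)).filter (fun jx => !(R.map (Nat.cast : Nat → Int)).contains jx.1)).map (·.2) =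
        pvKeepFrom R k w := by
  intro w
  induction w with
  | nil => intro k; rfl
  | cons a t ih =>
    intro k
    rw [PySem.List.enumerate_cons, List.filter_cons]
    have hcast : (k : Int) + 1 = ((k + 1 : Nat) : Int) := by push_cast; ring
    have hc : ((R.map (Nat.cast : Nat → Int)).contains ((k : Nat) : Int)) = decide (k ∈ R) :=
      pvContainsCast R k
    by_cases hm : k ∈ R
    · rw [pvKeepFrom, if_pos hm]
      rw [show (!(R.map (Nat.cast : Nat → Int)).contains ((k : Nat) : Int)) = false by
        rw [hc]; simpa using hm]
      rw [if_neg (by simp), hcast, ih (k + 1)]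
    · rw [pvKeepFrom, if_neg hm]
      rw [show (!(R.map (Nat.cast : Nat → Int)).contains ((k : Nat) : Int)) = true by
        rw [hc]; simpa using hm]
      rw [if_pos rfl, List.map_cons, hcast, ih (k + 1)]


theorem pvREq (ps : List (List (List Int))) (pts : List (String × List Int)) (t : Nat) :
    pvR ps pts t = pvRpos (pvMarker pts t) (ps.getD t []) := by
  unfold pvR pvMarker
  exact pvRangeFilterEqRpos _ _

theorem pvRposSorted (e : List Int) (r : List (List Int)) :
    (pvRpos e r).Pairwise (· < ·) :=
  pvRangeFilterEqRpos e r ▸ List.Pairwise.filter _ List.pairwise_lt_range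

theorem pvRposMemLt (e : List Int) (r : List (List Int)) :
    ∀ j ∈ pvRpos e r, j < r.length := by
  intro j hj
  rw [← pvRangeFilterEqRpos] at hj
  exact List.mem_range.mp (List.mem_filter.mp hj).1

theorem pvRmCast (e : List Int) (r : List (List Int)) :
    ((PySem.List.enumerate r 0).filter (fun jx => jx.2 == e)).map (·.1) =
      (pvRpos e r).map (Nat.cast : Nat → Int) := by
  have h := pvRmEqRpos e r 0
  rw [Nat.cast_zero] at h
  rw [h]
  exact List.map_congr_left (fun j _ => by push_cast; ring)

def pvPhi (e : List Int) (r : List (List Int)) : List (List Int) :=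
  let rm := ((PySem.List.enumerate r 0).filter (fun jx => jx.2 == e)).map (·.1)
  if rm.isEmpty then r
  else ((PySem.List.enumerate r 0).filter (fun jx => !rm.contains jx.1)).map (·.2)

def pvPsi (e : List Int) (r : List (List Int)) (w : List (List Int)) : List (List Int) :=
  let rm := ((PySem.List.enumerate r 0).filter (fun jx => jx.2 == e)).map (·.1)
  if rm.isEmpty then w
  else ((PySem.List.enumerate w 0).filter (fun jx => !rm.contains jx.1)).map (·.2)

theorem pvCore (e : List Int) (r w : List (List Int))
    (H : pvRpos e r ≠ [] →
      ∀ k < (pvRpos e r).length,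
        (pvRpos e r).getD k 0 + ((pvRpos e r).length - 1 - k) < w.length) :
    ((pvRpos e r).reverse).foldl pvEraseOp w = pvPsi e r w := by
  by_cases h : pvRpos e r = []
  · simp [pvPsi, pvRmCast, h]
  · have hne : ((pvRpos e r).map (Nat.cast : Nat → Int)).isEmpty = false := by simpa using h
    simp only [pvPsi, pvRmCast, hne, Bool.false_eq_true, if_false]
    rw [pvEraseFoldEqKeep (pvRpos e r) (pvRposSorted e r) w (H h)]
    have hk := pvKeepIEqKeepFrom (R := pvRpos e r) w 0
    rw [Nat.cast_zero] at hk
    rw [hk]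

-- ---- normal forms of the two ports ----
def pvF (ps : List (List (List Int))) (pts : List (String × List Int)) (i : Nat)
    (r : List (List Int)) : List (List Int) :=
  ((pvR ps pts i).reverse).foldl pvEraseOp r


theorem pvGroupFold (i : Nat) :
    ∀ (js : List Nat) (s : List (List (List Int)) × List (List (List Int))),
      (js.map (fun j => (((i : Nat) : Int), ((j : Nat) : Int)))).foldl
          (fun s q => (s.1.modify q.1.toNat (fun r => pvDelAt r q.2),
                       s.2.modify q.1.toNat (fun r => pvDelAt r q.2))) s =
        (s.1.modify i (fun r => js.foldl pvEraseOp r),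
         s.2.modify i (fun r => js.foldl pvEraseOp r)) := by
  intro js
  induction js with
  | nil =>
    intro s
    simp only [List.map_nil, List.foldl_nil]
    rw [pvModifyId, pvModifyId]
  | cons j js' ih =>
    intro s
    simp only [List.map_cons, List.foldl_cons, Int.toNat_natCast]
    rw [ih, pvModifyModify, pvModifyModify]
    have hfun : (fun x : List (List Int) => js'.foldl pvEraseOp (pvDelAt x ((j : Nat) : Int))) =
        (fun r : List (List Int) => (j :: js').foldl pvEraseOp r) := by
      funext x
      rw [List.foldl_cons, pvDelAtNatCast]
    rw [hfun]
    rfl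

theorem pvAnorm (ps : List (List (List Int))) (pts : List (String × List Int))
    (vs : List (List (List Int))) :
    remove_empty_routes ps pts vs =
      ((List.range ps.length).reverse).foldl
        (fun s i => (s.1.modify i (pvF ps pts i), s.2.modify i (pvF ps pts i))) (ps, vs) := by
  simp only [remove_empty_routes]
  have hAux :
      (PySem.List.pyRange 0 ps.length 1).foldl (fun acc i =>
        (PySem.List.pyRange 0 (PySem.List.pyGetD ps i []).length 1).foldl (fun acc2 j =>
          if PySem.List.pyGetD (PySem.List.pyGetD ps i []) j [] ==
              [pvFindId i pts, pvFindId i pts] then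
            acc2 ++ [(i, j)] else acc2) acc) ([] : List (Int × Int)) =
      (List.range ps.length).flatMap
        (fun i => (pvR ps pts i).map (fun j => (((i : Nat) : Int), ((j : Nat) : Int)))) := by
    rw [PySem.List.pyRange_zero_natCast, List.foldl_map]
    refine Eq.trans (PySem.List.foldl_congr_mem _ _ (fun (acc : List (Int × Int)) (i : Nat) =>
      acc ++ (pvR ps pts i).map (fun j => (((i : Nat) : Int), ((j : Nat) : Int)))) _ ?_) ?_
    · intro acc i _
      rw [PySem.List.pyGetD_natCast, PySem.List.pyRange_zero_natCast, List.foldl_map]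
      simp only [PySem.List.pyGetD_natCast]
      rw [PySem.List.foldl_append_if
        (p := fun j : Nat => (ps.getD i []).getD j [] == [pvFindId (i : Int) pts, pvFindId (i : Int) pts])
        (f := fun j : Nat => (((i : Nat) : Int), ((j : Nat) : Int)))]
      have : pvFindId ((i : Nat) : Int) pts = ((pts.lookup "id").getD []).getD i 0 := by
        unfold pvFindId
        rw [PySem.List.pyGetD_natCast]
      rw [this]
      rfl
    · rw [PySem.List.foldl_append_eq_flatMap, List.nil_append]
  rw [hAux]
  rw [PySem.List.pyRange_zero_natCast, ← List.map_reverse, List.foldl_map]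
  simp only [PySem.List.pyGetD_natCast]
  rw [pvFoldlRevRangeGetD
      (fun (s : List (List (List Int)) × List (List (List Int))) (q : Int × Int) =>
        (s.1.modify q.1.toNat fun r => pvDelAt r q.2, s.2.modify q.1.toNat fun r => pvDelAt r q.2))
      ((0 : Int), (0 : Int))]
  rw [List.reverse_flatMap, List.foldl_flatMap]
  apply PySem.List.foldl_congr_mem
  intro s i _
  simp only [Function.comp_apply]
  rw [← List.map_reverse, pvGroupFold]
  rfl

theorem pvBnorm (ps : List (List (List Int))) (pts : List (String × List Int))
    (vs : List (List (List Int))) :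
    remove_empty_routes_alt ps pts vs =
      (List.range ps.length).foldl
        (fun s i => (s.1.modify i (pvPhi (pvMarker pts i)),
                     s.2.modify i (pvPsi (pvMarker pts i) (s.1.getD i []) ))) (ps, vs) := by
  unfold remove_empty_routes_alt
  rw [PySem.List.pyRange_zero_natCast, List.foldl_map]
  apply PySem.List.foldl_congr_mem
  intro s i _
  simp only [PySem.List.pyGetD_natCast, Int.toNat_natCast]
  set r := s.1.getD i [] with hr
  set e := pvMarker pts i with he
  have hee : [((pts.lookup "id").getD []).getD i 0, ((pts.lookup "id").getD []).getD i 0] = e := rfl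
  rw [hee]
  set rm := ((PySem.List.enumerate r 0).filter (fun jx => jx.2 == e)).map (·.1) with hrm
  by_cases hem : rm.isEmpty
  · rw [if_pos hem]
    have h1 : s.1.modify i (pvPhi e) = s.1 := by
      apply pvModifyOfFix s.1 i []
      show pvPhi e r = r
      unfold pvPhi
      rw [← hrm, if_pos hem]
    have h2 : s.2.modify i (pvPsi e r) = s.2 := by
      apply pvModifyOfFix s.2 i []
      show pvPsi e r (s.2.getD i []) = s.2.getD i []
      unfold pvPsi
      rw [← hrm, if_pos hem]
    rw [h1, h2]
  · rw [if_neg hem]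
    have h1 : s.1.set i (((PySem.List.enumerate r 0).filter (fun jx => !rm.contains jx.1)).map (·.2)) =
        s.1.modify i (pvPhi e) := by
      rw [← pvSetEqModify s.1 i [] (pvPhi e)]
      congr 1
      show _ = pvPhi e r
      unfold pvPhi
      rw [← hrm, if_neg hem]
    have h2 : s.2.set i (((PySem.List.enumerate (s.2.getD i []) 0).filter (fun jx => !rm.contains jx.1)).map (·.2)) =
        s.2.modify i (pvPsi e r) := by
      rw [← pvSetEqModify s.2 i [] (pvPsi e r)]
      congr 1
      show _ = pvPsi e r (s.2.getD i [])
      unfold pvPsi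
      rw [← hrm, if_neg hem]
    rw [h1, h2]

-- ---- per-route value equalities ----
theorem pvRouteEq (ps : List (List (List Int))) (pts : List (String × List Int)) (t : Nat) :
    pvF ps pts t (ps.getD t []) = pvPhi (pvMarker pts t) (ps.getD t []) := by
  show pvF ps pts t (ps.getD t []) = pvPsi (pvMarker pts t) (ps.getD t []) (ps.getD t [])
  unfold pvF
  rw [pvREq]
  exact pvCore _ _ _ (fun _ => pvPairwiseGetDAdd _ (pvRposSorted _ _) _ (pvRposMemLt _ _))

theorem pvVehEq (ps : List (List (List Int))) (pts : List (String × List Int))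
    (vs : List (List (List Int))) (t : Nat)
    (hpre : pvR ps pts t ≠ [] →
      ∀ k < (pvR ps pts t).length,
        (pvR ps pts t).getD k 0 + ((pvR ps pts t).length - 1 - k) < (vs.getD t []).length) :
    pvF ps pts t (vs.getD t []) = pvPsi (pvMarker pts t) (ps.getD t []) (vs.getD t []) := by
  unfold pvF
  rw [pvREq] at hpre ⊢
  exact pvCore _ _ _ hpre

-- ===== VERDICT (by name: the statement is the Claim_ definition above) =====
theorem remove_empty_routes_spec : Claim_equal_remove_empty_routes := by
  intro ps pts vs _ hpre
  unfold Spec_remove_empty_routes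
  rw [pvAnorm, pvBnorm]
  have hA := fun t => pvFoldModifyPair ([] : List (List Int)) (pvF ps pts)
    (fun i _ => pvF ps pts i) ((List.range ps.length).reverse)
    (by simp only [List.nodup_reverse]; exact List.nodup_range) ps vs t
  have hB := fun t => pvFoldModifyPair ([] : List (List Int)) (fun i => pvPhi (pvMarker pts i))
    (fun i r => pvPsi (pvMarker pts i) r) (List.range ps.length) List.nodup_range ps vs t
  apply Prod.ext
  · apply List.ext_getElem?
    intro t
    rw [(hA t).1, (hB t).1]
    simp only [List.mem_reverse, List.mem_range]
    split
    · next ht =>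
      have : ps[t]? = some (ps.getD t []) := by
        rw [List.getD_eq_getElem ps [] ht]; exact List.getElem?_eq_getElem ht
      rw [this, Option.map_some, Option.map_some, pvRouteEq ps pts t]
    · rfl
  · apply List.ext_getElem?
    intro t
    rw [(hA t).2, (hB t).2]
    simp only [List.mem_reverse, List.mem_range]
    split
    · next ht =>
      cases hvt : vs[t]? with
      | none => rfl
      | some w =>
        have hw : w = vs.getD t [] := by
          rw [List.getD_eq_getElem?_getD, hvt]; rfl
        subst hw
        rw [Option.map_some, Option.map_some,
          pvVehEq ps pts vs t (fun hne => ((hpre t ht).2 hne).2)]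
    · rfl
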